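-- pv_equiv track=rewrite | github.com/Acebots-AI/acedev | acedev/tools/code_editor.py | reconcile_subsequence
-- ===== SOURCE A (Python) =====
-- def reconcile_subsequence(subsequence: list[str], superset: list[str], extra_lines: int = 3) -> list[str]:
--     """
--     Reconciles a subsequence of text with the original superset of lines.
--
--     Args:
--         subsequence (list[str]): The subsequence to evaluate.
--         superset (list[str]): The original superset of lines.
--
--     Returns:
--         list[str]: The reconciled subsequence.
--     """
--     reconciled: list[str] = []
--     superset_index = 0
--     subsequence_index = 0
--
--     while subsequence_index < len(subsequence) and superset_index < len(superset):
--         if subsequence[subsequence_index] == superset[superset_index]: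
--             reconciled.append(subsequence[subsequence_index])
--             subsequence_index += 1
--             superset_index += 1
--         elif subsequence[subsequence_index] in superset[superset_index:]:
--             # If the current line in subsequence exists further in the superset,
--             # add missing lines from the superset to the reconciled list
--             next_correct_index = superset.index(subsequence[subsequence_index], superset_index)
--             reconciled.extend(superset[superset_index:next_correct_index])
--             superset_index = next_correct_index
--         else:
--             # Remove non-existing lines from the subsequence
--             subsequence_index += 1
--
--     # Add any remaining lines from the superset to the reconciled list
--     if superset_index < len(superset):
--         reconciled.extend(superset[superset_index : superset_index + extra_lines])
--
--     return reconciled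
-- ===== SOURCE B (Python) =====
-- from bisect import bisect_left
--
--
-- def reconcile_subsequence(subsequence: list[str], superset: list[str], extra_lines: int = 3) -> list[str]:
--     # Index every superset line by its sorted list of positions, then for each
--     # subsequence line bisect for its next occurrence at or after the cursor.
--     positions: dict[str, list[int]] = {}
--     for i, line in enumerate(superset):
--         positions.setdefault(line, []).append(i)
--
--     out: list[str] = []
--     si = 0
--     for line in subsequence:
--         if si >= len(superset):
--             break
--         ps = positions.get(line)
--         if ps is None:
--             continue
--         k = bisect_left(ps, si)
--         if k == len(ps):
--             continue
--         j = ps[k]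
--         out.extend(superset[si : j + 1])
--         si = j + 1
--
--     if si < len(superset):
--         out.extend(superset[si : si + extra_lines])
--     return out
-- ===== Notes on version B (the rewrite author's own statement) =====
-- stated objective: faster
-- what changed: A rescans the superset suffix for every subsequence line ('in' test plus list.index); B builds a line->sorted-positions dict once and finds the next occurrence at or after the cursor with bisect, emitting the gap slice in one step.
import Mathlib
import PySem

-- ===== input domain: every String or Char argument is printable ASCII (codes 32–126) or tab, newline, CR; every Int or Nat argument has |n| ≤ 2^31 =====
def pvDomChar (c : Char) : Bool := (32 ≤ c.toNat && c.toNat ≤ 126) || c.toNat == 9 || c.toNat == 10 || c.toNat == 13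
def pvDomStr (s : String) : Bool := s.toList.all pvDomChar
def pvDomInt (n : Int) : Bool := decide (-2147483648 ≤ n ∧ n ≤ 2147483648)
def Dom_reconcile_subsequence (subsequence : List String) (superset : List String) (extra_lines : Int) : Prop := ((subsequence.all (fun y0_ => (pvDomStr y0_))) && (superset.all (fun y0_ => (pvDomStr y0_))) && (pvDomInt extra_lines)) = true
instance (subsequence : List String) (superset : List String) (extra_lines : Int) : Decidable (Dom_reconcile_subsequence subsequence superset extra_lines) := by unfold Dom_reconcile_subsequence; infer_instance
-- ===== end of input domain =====

-- B replaces A's per-line scans of the superset suffix ('in' + list.index) by a positions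
-- dict built once plus bisect for the next occurrence at or after the cursor (objective: faster).

-- ===== PORT A =====

-- termination helper for A's elif branch: the found occurrence is strictly ahead of the cursor
theorem pvIdxPos (superset : List String) (si : Nat) (x : String)
    (hsi : si < superset.length) (hne : superset[si] ≠ x) (d : Nat)
    (h : PySem.List.index? (superset.drop si) x = some d) : 0 < d := by
  rcases PySem.List.getElem_of_index?_eq_some h with ⟨hd, hx, _⟩
  rcases Nat.eq_zero_or_pos d with h0 | h0
  · subst h0
    rw [List.getElem_drop] at hx
    exact absurd (by simpa using hx) hne
  · exact h0

-- while-loop of A: state (subsequence_index, superset_index, reconciled); returns (reconciled, superset_index)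
def pvALoop (subsequence superset : List String) (ii si : Nat) (acc : List String) : List String × Nat :=
  if h : ii < subsequence.length ∧ si < superset.length then
    if subsequence[ii]'h.1 = superset[si]'h.2 then
      pvALoop subsequence superset (ii + 1) (si + 1) (acc ++ [subsequence[ii]'h.1])
    else if subsequence[ii]'h.1 ∈ PySem.List.slice superset (some (si : Int)) none then
      match hidx : PySem.List.index? (superset.drop si) (subsequence[ii]'h.1) with
      | some d =>
        pvALoop subsequence superset ii (si + d)
          (acc ++ PySem.List.slice superset (some (si : Int)) (some ((si + d : Nat) : Int)))
      | none => (acc, si)  -- unreachable: guarded by the membership test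
    else
      pvALoop subsequence superset (ii + 1) si acc
  else (acc, si)
termination_by (subsequence.length - ii) + (superset.length - si)
decreasing_by
  · omega
  · have := pvIdxPos superset si (subsequence[ii]'h.1) h.2 (by simpa using Ne.symm ‹_›) d hidx
    omega
  · omega

def reconcile_subsequence (subsequence : List String) (superset : List String) (extra_lines : Int) : List String :=
  let r := pvALoop subsequence superset 0 0 []
  if r.2 < superset.length then
    r.1 ++ PySem.List.slice superset (some (r.2 : Int)) (some ((r.2 : Int) + extra_lines))
  else r.1

-- ===== PORT B =====

-- positions: dict line -> list of its indices in superset, in increasing order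
def pvPositions (superset : List String) : PySem.Dict String (List Int) :=
  (PySem.List.enumerate superset).foldl
    (fun d p => d.modify p.2 [] (fun l => l ++ [p.1])) PySem.Dict.empty

-- for-loop of B: state (si, out); returns (out, si)
def pvBLoop (superset : List String) (positions : PySem.Dict String (List Int)) :
    List String → Int → List String → List String × Int
  | [], si, out => (out, si)
  | line :: rest, si, out =>
    if (superset.length : Int) ≤ si then (out, si)
    else
      match positions.get? line with
      | none => pvBLoop superset positions rest si out
      | some ps =>
        if hk : PySem.List.bisectLeft ps si < ps.length then
          let j := ps[PySem.List.bisectLeft ps si]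
          pvBLoop superset positions rest (j + 1)
            (out ++ PySem.List.slice superset (some si) (some (j + 1)))
        else pvBLoop superset positions rest si out

def reconcile_subsequence_alt (subsequence : List String) (superset : List String) (extra_lines : Int) : List String :=
  let r := pvBLoop superset (pvPositions superset) subsequence 0 []
  if r.2 < (superset.length : Int) then
    r.1 ++ PySem.List.slice superset (some r.2) (some (r.2 + extra_lines))
  else r.1

-- ===== PRECONDITION & SPEC =====
def Spec_reconcile_subsequence (subsequence : List String) (superset : List String) (extra_lines : Int) (out : List String) : Prop := out = reconcile_subsequence_alt subsequence superset extra_lines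
instance (subsequence : List String) (superset : List String) (extra_lines : Int) (out : List String) : Decidable (Spec_reconcile_subsequence subsequence superset extra_lines out) := by unfold Spec_reconcile_subsequence; infer_instance

-- ===== CLAIM (what is proved, stated in full; the proofs are below) =====
def Claim_equal_reconcile_subsequence : Prop := ∀ (subsequence : List String) (superset : List String) (extra_lines : Int), Dom_reconcile_subsequence subsequence superset extra_lines → Spec_reconcile_subsequence subsequence superset extra_lines (reconcile_subsequence subsequence superset extra_lines)

-- ===== LEMMAS AND PROOFS =====

-- occurrence indices of v in xs, offset by s (what pvPositions stores under v, for s = 0)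
def pvOcc (xs : List String) (v : String) (s : Int) : List Int :=
  match xs with
  | [] => []
  | y :: ys => (if y = v then [s] else []) ++ pvOcc ys v (s + 1)

theorem pvOcc_mem (xs : List String) (v : String) (s j : Int) :
    j ∈ pvOcc xs v s ↔ ∃ (k : Nat) (h : k < xs.length), xs[k] = v ∧ j = s + (k : Int) := by
  induction xs generalizing s with
  | nil => simp [pvOcc]
  | cons y ys ih =>
    simp only [pvOcc, List.mem_append, ih]
    constructor
    · rintro (hy | ⟨k, hk, hv, rfl⟩)
      · refine ⟨0, by simp, ?_, ?_⟩ <;> split_ifs at hy <;> simp_all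
      · exact ⟨k + 1, by simpa using hk, by simpa using hv, by push_cast; ring⟩
    · rintro ⟨k, hk, hv, rfl⟩
      cases k with
      | zero => left; simp_all
      | succ k => right; exact ⟨k, by simpa using hk, by simpa using hv, by push_cast; ring⟩

theorem pvOcc_lb (xs : List String) (v : String) (s : Int) : ∀ j ∈ pvOcc xs v s, s ≤ j := by
  intro j hj
  rcases (pvOcc_mem xs v s j).1 hj with ⟨k, _, _, rfl⟩
  omega

theorem pvOcc_sorted (xs : List String) (v : String) (s : Int) :
    (pvOcc xs v s).Pairwise (· < ·) := by
  induction xs generalizing s with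
  | nil => simp [pvOcc]
  | cons y ys ih =>
    simp only [pvOcc]
    refine List.pairwise_append.2 ⟨?_, ih (s + 1), ?_⟩
    · split_ifs <;> simp
    · intro a ha b hb
      have hb' := pvOcc_lb ys v (s + 1) b hb
      split_ifs at ha <;> simp_all

theorem pvPositions_getD (superset : List String) (v : String) :
    (pvPositions superset).getD v [] = pvOcc superset v 0 := by
  have hswap : pvPositions superset =
      ((PySem.List.enumerate superset).map Prod.swap).foldl
        (fun d p => d.modify p.1 [] (fun l => l ++ [p.2])) PySem.Dict.empty := by
    rw [List.foldl_map]; rfl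
  rw [hswap, PySem.Dict.getD_foldl_modify_append]
  have : ∀ (xs : List String) (s : Int),
      (((PySem.List.enumerate xs s).map Prod.swap).filter (fun p => p.1 == v)).map (·.2)
        = pvOcc xs v s := by
    intro xs
    induction xs with
    | nil => intro s; simp [PySem.List.enumerate_nil, pvOcc]
    | cons y ys ih =>
      intro s
      rw [PySem.List.enumerate_cons]
      by_cases hy : y = v <;> simp [pvOcc, hy, ih (s + 1)]
  simpa using this superset 0

-- key lookup lemma: bisecting the occurrence list finds exactly what A's index? finds
theorem pvBisect_some (superset : List String) (v : String) (si d : Nat)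
    (h : PySem.List.index? (superset.drop si) v = some d) :
    ∃ hk : PySem.List.bisectLeft (pvOcc superset v 0) (si : Int) < (pvOcc superset v 0).length,
      (pvOcc superset v 0)[PySem.List.bisectLeft (pvOcc superset v 0) (si : Int)] = (si : Int) + d := by
  have hsorted := pvOcc_sorted superset v 0
  obtain ⟨hle, hlt, hge⟩ :=
    PySem.List.bisectLeft_spec (pvOcc superset v 0) (si : Int) (hsorted.imp (fun h => le_of_lt h))
  rcases PySem.List.getElem_of_index?_eq_some h with ⟨hd, hx, hfirst⟩
  have hlen : (superset.drop si).length = superset.length - si := by simp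
  have hsd : si + d < superset.length := by omega
  have hx' : superset[si + d]'hsd = v := by rw [← hx, List.getElem_drop]
  have hmem : ((si : Int) + d) ∈ pvOcc superset v 0 := by
    rw [pvOcc_mem]
    exact ⟨si + d, hsd, hx', by push_cast; ring⟩
  obtain ⟨m, hm, hPm⟩ := List.getElem_of_mem hmem
  have hkm : PySem.List.bisectLeft (pvOcc superset v 0) (si : Int) ≤ m := by
    by_contra hc
    have := hlt m hm (by omega)
    omega
  have hklen : PySem.List.bisectLeft (pvOcc superset v 0) (si : Int) < (pvOcc superset v 0).length :=
    lt_of_le_of_lt hkm hm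
  have hPk_le : (pvOcc superset v 0)[PySem.List.bisectLeft (pvOcc superset v 0) (si : Int)]
      ≤ (si : Int) + d := by
    rcases eq_or_lt_of_le hkm with heq | hlt'
    · rw [← hPm]
      exact le_of_eq (by congr 1)
    · have := (List.pairwise_iff_getElem.1 hsorted) _ m hklen hm hlt'
      omega
  have hPk_ge : (si : Int)
      ≤ (pvOcc superset v 0)[PySem.List.bisectLeft (pvOcc superset v 0) (si : Int)] :=
    hge _ hklen le_rfl
  have hPkmem := List.getElem_mem hklen
  rw [pvOcc_mem] at hPkmem
  obtain ⟨k', hk', hvk', hPk⟩ := hPkmem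
  have hk'ge : si ≤ k' := by omega
  have hk'le : k' ≤ si + d := by omega
  refine ⟨hklen, ?_⟩
  rcases eq_or_lt_of_le hk'le with heq | hlt'
  · rw [hPk, heq]; push_cast; ring
  · exfalso
    have he : k' - si < d := by omega
    apply hfirst (k' - si) he
    rw [List.getElem_drop]
    have hks : si + (k' - si) = k' := by omega
    simp_all

theorem pvBisect_none (superset : List String) (v : String) (si : Nat)
    (h : v ∉ superset.drop si) :
    PySem.List.bisectLeft (pvOcc superset v 0) (si : Int) = (pvOcc superset v 0).length := by
  have hsorted := pvOcc_sorted superset v 0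
  obtain ⟨hle, hlt, hge⟩ :=
    PySem.List.bisectLeft_spec (pvOcc superset v 0) (si : Int) (hsorted.imp (fun h => le_of_lt h))
  by_contra hc
  have hklen : PySem.List.bisectLeft (pvOcc superset v 0) (si : Int) < (pvOcc superset v 0).length := by
    omega
  have hPk_ge : (si : Int)
      ≤ (pvOcc superset v 0)[PySem.List.bisectLeft (pvOcc superset v 0) (si : Int)] :=
    hge _ hklen le_rfl
  have hPkmem := List.getElem_mem hklen
  rw [pvOcc_mem] at hPkmem
  obtain ⟨k', hk', hvk', hPk⟩ := hPkmem
  have hk'ge : si ≤ k' := by omega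
  apply h
  have hg : (superset.drop si)[k' - si]'(by simp; omega) = v := by
    rw [List.getElem_drop]
    have hks : si + (k' - si) = k' := by omega
    simp_all
  rw [← hg]
  exact List.getElem_mem _

-- pvBLoop with the positions dict of superset: one-step characterisations
theorem pvBLoop_skip (superset : List String) (x : String) (rest : List String)
    (si : Nat) (out : List String) (hsi : si < superset.length)
    (hmem : x ∉ superset.drop si) :
    pvBLoop superset (pvPositions superset) (x :: rest) (si : Int) out
      = pvBLoop superset (pvPositions superset) rest (si : Int) out := by
  rw [pvBLoop]
  have hlt : ¬ ((superset.length : Int) ≤ (si : Int)) := by exact_mod_cast Nat.not_le.2 hsi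
  rw [if_neg hlt]
  cases hg : (pvPositions superset).get? x with
  | none => rfl
  | some ps =>
    have hps : ps = pvOcc superset x 0 := by
      have hgd := pvPositions_getD superset x
      rw [PySem.Dict.getD, hg] at hgd
      simpa using hgd
    subst hps
    dsimp only
    rw [dif_neg (by rw [pvBisect_none superset x si hmem]; omega)]

theorem pvBLoop_hit (superset : List String) (x : String) (rest : List String)
    (si d : Nat) (out : List String) (hsi : si < superset.length)
    (hidx : PySem.List.index? (superset.drop si) x = some d) :
    pvBLoop superset (pvPositions superset) (x :: rest) (si : Int) out
      = pvBLoop superset (pvPositions superset) rest ((si + d + 1 : Nat) : Int)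
          (out ++ PySem.List.slice superset (some (si : Int)) (some ((si + d + 1 : Nat) : Int))) := by
  rw [pvBLoop]
  have hlt : ¬ ((superset.length : Int) ≤ (si : Int)) := by exact_mod_cast Nat.not_le.2 hsi
  rw [if_neg hlt]
  obtain ⟨hklen, hPk⟩ := pvBisect_some superset x si d hidx
  have hg : (pvPositions superset).get? x = some (pvOcc superset x 0) := by
    cases hg : (pvPositions superset).get? x with
    | none =>
      exfalso
      have hgd := pvPositions_getD superset x
      rw [PySem.Dict.getD, hg] at hgd
      have hlen0 : (pvOcc superset x 0).length = 0 := by rw [← hgd]; simp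
      omega
    | some ps =>
      have hgd := pvPositions_getD superset x
      rw [PySem.Dict.getD, hg] at hgd
      simp at hgd
      rw [hgd]
  rw [hg]
  dsimp only
  rw [dif_pos hklen]
  have harg : (pvOcc superset x 0)[PySem.List.bisectLeft (pvOcc superset x 0) (si : Int)] + 1
      = ((si + d + 1 : Nat) : Int) := by rw [hPk]; push_cast; ring
  rw [harg]

-- accumulator lemma for pvBLoop
theorem pvBLoop_out (superset : List String) (positions : PySem.Dict String (List Int))
    (l : List String) (si : Int) (out : List String) :
    pvBLoop superset positions l si out
      = (out ++ (pvBLoop superset positions l si []).1,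
         (pvBLoop superset positions l si []).2) := by
  induction l generalizing si out with
  | nil => simp [pvBLoop]
  | cons x rest ih =>
    simp only [pvBLoop]
    by_cases hc : (superset.length : Int) ≤ si
    · simp [hc]
    · simp only [if_neg hc]
      cases hg : positions.get? x with
      | none => exact ih si out
      | some ps =>
        dsimp only
        by_cases hk : PySem.List.bisectLeft ps si < ps.length
        · simp only [dif_pos hk]
          rw [ih _ (out ++ _), ih _ ([] ++ _)]
          simp
        · simp only [dif_neg hk]
          exact ih si out

-- the two loops agree (A's pair, with B's superset_index as an Int)
theorem pvLoops_agree (subsequence superset : List String) :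
    ∀ (ii si : Nat) (acc : List String),
      pvALoop subsequence superset ii si acc
        = (acc ++ (pvBLoop superset (pvPositions superset) (subsequence.drop ii) (si : Int) []).1,
           (pvBLoop superset (pvPositions superset) (subsequence.drop ii) (si : Int) []).2.toNat) := by
  intro ii si acc
  fun_induction pvALoop subsequence superset ii si acc with
  | case1 ii si acc h heq ih =>
    -- equal branch
    have hdrop : subsequence.drop ii = subsequence[ii]'h.1 :: subsequence.drop (ii + 1) :=
      List.drop_eq_getElem_cons h.1
    have hidx : PySem.List.index? (superset.drop si) (subsequence[ii]'h.1) = some 0 := by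
      rw [List.drop_eq_getElem_cons h.2, ← heq]
      exact PySem.List.index?_cons_self _ _
    rw [ih, hdrop, pvBLoop_hit superset _ _ si 0 [] h.2 hidx]
    rw [pvBLoop_out superset _ _ _ ([] ++ _)]
    have hslice : PySem.List.slice superset (some (si : Int)) (some ((si + 0 + 1 : Nat) : Int))
        = [subsequence[ii]'h.1] := by
      have : ((si + 0 + 1 : Nat) : Int) = (si : Int) + (1 : Nat) := by push_cast; ring
      rw [this, PySem.List.slice_natCast_add]
      rw [List.drop_eq_getElem_cons h.2, ← heq]
      simp
    have hsi1 : ((si + 0 + 1 : Nat) : Int) = ((si + 1 : Nat) : Int) := by push_cast; ring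
    rw [hslice, hsi1]
    simp
  | case2 ii si acc h heq hmem d hidx ih =>
    -- elif branch: A moves the cursor to the found occurrence, then matches it next turn
    have hd : 0 < d := pvIdxPos superset si _ h.2 (by simpa using Ne.symm heq) d hidx
    rcases PySem.List.getElem_of_index?_eq_some hidx with ⟨hdl, hxv, hfirst⟩
    have hsd : si + d < superset.length := by
      have hlen : (superset.drop si).length = superset.length - si := by simp
      omega
    have hdrop : subsequence.drop ii = subsequence[ii]'h.1 :: subsequence.drop (ii + 1) :=
      List.drop_eq_getElem_cons h.1
    have hidx2 : PySem.List.index? (superset.drop (si + d)) (subsequence[ii]'h.1) = some 0 := by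
      rw [List.drop_eq_getElem_cons hsd]
      have hxx : superset[si + d]'hsd = subsequence[ii]'h.1 := by
        rw [← hxv, List.getElem_drop]
      rw [hxx]
      exact PySem.List.index?_cons_self _ _
    rw [ih, hdrop]
    rw [pvBLoop_hit superset _ _ (si + d) 0 [] hsd hidx2]
    rw [pvBLoop_hit superset _ _ si d [] h.2 hidx]
    rw [pvBLoop_out superset _ _ _ ([] ++ _), pvBLoop_out superset _ _ _ ([] ++ _)]
    simp only [Nat.add_zero, List.nil_append]
    -- slices compose: sup[si:si+d] ++ sup[si+d:si+d+1] = sup[si:si+d+1]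
    have hsplit : PySem.List.slice superset (some (si : Int)) (some ((si + d : Nat) : Int))
        ++ PySem.List.slice superset (some ((si + d : Nat) : Int)) (some ((si + d + 1 : Nat) : Int))
        = PySem.List.slice superset (some (si : Int)) (some ((si + d + 1 : Nat) : Int)) := by
      rw [PySem.List.slice_natCast, PySem.List.slice_natCast, PySem.List.slice_natCast]
      have e1 : si + d - si = d := by omega
      have e2 : si + d + 1 - (si + d) = 1 := by omega
      have e3 : si + d + 1 - si = d + 1 := by omega
      have htake1 : List.take 1 (List.drop (si + d) superset) = [superset[si + d]'hsd] := by
        rw [List.drop_eq_getElem_cons hsd]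
        rfl
      rw [e1, e2, e3, htake1, ← List.take_concat_get' _ d hdl, List.getElem_drop]
    rw [← hsplit]
    simp [List.append_assoc]
  | case3 ii si acc h heq hmem hidx =>
    -- unreachable none arm: membership guarantees index? finds an occurrence
    exfalso
    rw [PySem.List.slice_from_natCast] at hmem
    rw [PySem.List.index?_eq_none_iff] at hidx
    exact hidx hmem
  | case4 ii si acc h heq hmem ih =>
    -- subsequence line absent from the remaining superset: skipped on both sides
    have hdrop : subsequence.drop ii = subsequence[ii]'h.1 :: subsequence.drop (ii + 1) :=
      List.drop_eq_getElem_cons h.1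
    have hmem' : subsequence[ii]'h.1 ∉ superset.drop si := by
      rwa [PySem.List.slice_from_natCast] at hmem
    rw [ih, hdrop, pvBLoop_skip superset _ _ si [] h.2 hmem']
  | case5 ii si acc h =>
    -- loop exit
    rcases Nat.lt_or_ge ii subsequence.length with hii | hii
    · have hsi : superset.length ≤ si := by omega
      have hdrop : subsequence.drop ii = subsequence[ii]'hii :: subsequence.drop (ii + 1) :=
        List.drop_eq_getElem_cons hii
      rw [hdrop, pvBLoop]
      rw [if_pos (by exact_mod_cast hsi)]
      simp
    · rw [List.drop_eq_nil_of_le hii, pvBLoop]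
      simp

theorem pvBLoop_nonneg (superset : List String) (positions : PySem.Dict String (List Int))
    (l : List String) (si : Int) (out : List String) (hsi : 0 ≤ si)
    (hpos : ∀ v ps, positions.get? v = some ps → ∀ j ∈ ps, 0 ≤ j) :
    0 ≤ (pvBLoop superset positions l si out).2 := by
  induction l generalizing si out with
  | nil => simpa [pvBLoop]
  | cons x rest ih =>
    simp only [pvBLoop]
    by_cases hc : (superset.length : Int) ≤ si
    · simpa [hc]
    · simp only [if_neg hc]
      cases hg : positions.get? x with
      | none => exact ih si out hsi
      | some ps =>
        dsimp only
        by_cases hk : PySem.List.bisectLeft ps si < ps.length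
        · simp only [dif_pos hk]
          refine ih _ _ ?_
          have := hpos x ps hg _ (List.getElem_mem hk)
          omega
        · simp only [dif_neg hk]
          exact ih si out hsi

-- ===== VERDICT (by name: the statement is the Claim_ definition above) =====
theorem reconcile_subsequence_spec : Claim_equal_reconcile_subsequence := by
  intro subsequence superset extra_lines _
  show _ = _
  unfold reconcile_subsequence reconcile_subsequence_alt
  have hmain := pvLoops_agree subsequence superset 0 0 []
  simp only [List.drop_zero, Nat.cast_zero] at hmain
  have hnn : 0 ≤ (pvBLoop superset (pvPositions superset) subsequence 0 []).2 := by
    refine pvBLoop_nonneg superset _ subsequence 0 [] le_rfl ?_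
    intro v ps hg j hj
    have hgd := pvPositions_getD superset v
    rw [PySem.Dict.getD, hg] at hgd
    simp at hgd
    subst hgd
    exact pvOcc_lb superset v 0 j hj
  rw [hmain]
  set p := pvBLoop superset (pvPositions superset) subsequence 0 [] with hp
  have hcast : ((p.2.toNat : Int)) = p.2 := Int.toNat_of_nonneg hnn
  by_cases hlt : p.2 < (superset.length : Int)
  · rw [if_pos (by omega : p.2.toNat < superset.length), if_pos hlt]
    rw [hcast]
    simp
  · rw [if_neg (by omega : ¬ p.2.toNat < superset.length), if_neg hlt]
    simp
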